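-- pv_equiv track=rewrite | github.com/ypratap11/vritti | src/api/main.py | get_pattern_priority
-- ===== SOURCE A (Python) =====
-- def get_pattern_priority(pattern: str) -> int:
--     """
--     Assign priority scores to different patterns
--     """
--     pattern_upper = pattern.upper()
--
--     # Highest priority: Explicit "Amount Due" patterns
--     if 'AMOUNT.*DUE' in pattern_upper or 'THIS.*AMOUNT.*DUE' in pattern_upper:
--         return 10
--     elif 'TOTAL.*AMOUNT.*DUE' in pattern_upper or 'BALANCE.*DUE' in pattern_upper:
--         return 9
--
--     # High priority: Total patterns
--     elif 'ESTIMATE.*TOTAL' in pattern_upper or 'FINAL.*TOTAL' in pattern_upper: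
--         return 8
--     elif 'TOTAL' in pattern_upper:
--         return 7
--
--     # Medium priority: Date-based patterns
--     elif any(month in pattern_upper for month in ['JAN', 'FEB', 'MAR', 'APR', 'MAY', 'JUN']):
--         return 6
--     elif r'\d{2}/\d{2}/\d{4}' in pattern:
--         return 5
--
--     # Lower priority: Standard dollar patterns
--     else:
--         return 3
-- ===== SOURCE B (Python) =====
-- # Score-table scored by MAX over ALL matching rules (order-independent), not a
-- # first-match precedence cascade: correct because every higher-priority needle
-- # that a lower rule's needle contains yields the higher score anyway, so the
-- # maximum matched score equals the cascade's first hit.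
-- _RULES = [
--     (['JAN', 'FEB', 'MAR', 'APR', 'MAY', 'JUN'], 6),
--     (['TOTAL'], 7),
--     (['ESTIMATE.*TOTAL', 'FINAL.*TOTAL'], 8),
--     (['TOTAL.*AMOUNT.*DUE', 'BALANCE.*DUE'], 9),
--     (['AMOUNT.*DUE', 'THIS.*AMOUNT.*DUE'], 10),
-- ]
--
-- def get_pattern_priority(pattern: str) -> int:
--     upper = pattern.upper()
--     matched = [score for needles, score in _RULES
--                if any(n in upper for n in needles)]
--     # the date literal contains lowercase 'd', so it is checked on the raw string
--     if r'\d{2}/\d{2}/\d{4}' in pattern: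
--         matched.append(5)
--     return max(matched, default=3)
-- ===== Notes on version B (the rewrite author's own statement) =====
-- stated objective: alternative
-- what changed: Replaced the first-match precedence cascade with an order-independent max-over-all-matching-rules scoring: every rule is evaluated and the maximum matched score (default 3) is returned, which coincides with the cascade because higher rules always win the max.
import Mathlib
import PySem

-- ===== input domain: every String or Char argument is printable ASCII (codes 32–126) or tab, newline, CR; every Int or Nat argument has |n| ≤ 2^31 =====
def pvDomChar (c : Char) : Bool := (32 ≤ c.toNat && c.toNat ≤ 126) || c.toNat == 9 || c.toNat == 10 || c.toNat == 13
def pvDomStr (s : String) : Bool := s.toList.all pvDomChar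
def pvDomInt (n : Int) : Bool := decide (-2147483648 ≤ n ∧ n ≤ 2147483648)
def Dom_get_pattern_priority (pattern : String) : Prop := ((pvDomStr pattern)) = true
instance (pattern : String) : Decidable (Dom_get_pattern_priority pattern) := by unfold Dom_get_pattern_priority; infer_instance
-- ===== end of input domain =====

-- B replaces A's first-match precedence cascade by max-over-all-matching-rules scoring (alternative decomposition, same cost); the date literal is checked on the raw string since it contains a lowercase 'd'.


-- ===== PORT A =====
-- Port of A: the if/elif cascade, checks on pattern.upper() except the raw date literal.
def get_pattern_priority (pattern : String) : Int :=
  let pattern_upper := PySem.Str.upper pattern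
  if PySem.Str.isIn "AMOUNT.*DUE" pattern_upper || PySem.Str.isIn "THIS.*AMOUNT.*DUE" pattern_upper then 10
  else if PySem.Str.isIn "TOTAL.*AMOUNT.*DUE" pattern_upper || PySem.Str.isIn "BALANCE.*DUE" pattern_upper then 9
  else if PySem.Str.isIn "ESTIMATE.*TOTAL" pattern_upper || PySem.Str.isIn "FINAL.*TOTAL" pattern_upper then 8
  else if PySem.Str.isIn "TOTAL" pattern_upper then 7
  else if ["JAN", "FEB", "MAR", "APR", "MAY", "JUN"].any (fun month => PySem.Str.isIn month pattern_upper) then 6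
  else if PySem.Str.isIn "\\d{2}/\\d{2}/\\d{4}" pattern then 5
  else 3

-- ===== PORT B =====
-- B: evaluate ALL rules (listed low-to-high to stress order-independence), collect
-- the scores of the matching ones, and return the MAXIMUM matched score (default 3).
def pvRules : List (List String × Int) :=
  [ (["JAN", "FEB", "MAR", "APR", "MAY", "JUN"], 6),
    (["TOTAL"], 7),
    (["ESTIMATE.*TOTAL", "FINAL.*TOTAL"], 8),
    (["TOTAL.*AMOUNT.*DUE", "BALANCE.*DUE"], 9),
    (["AMOUNT.*DUE", "THIS.*AMOUNT.*DUE"], 10) ]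

def get_pattern_priority_alt (pattern : String) : Int :=
  let upper := PySem.Str.upper pattern
  let matched := (pvRules.filter (fun r => r.1.any (fun n => PySem.Str.isIn n upper))).map Prod.snd
  let matched := if PySem.Str.isIn "\\d{2}/\\d{2}/\\d{4}" pattern then matched ++ [5] else matched
  match PySem.List.max? matched (fun x => x) with
  | some m => m
  | none => 3

-- ===== PRECONDITION & SPEC =====
def Spec_get_pattern_priority (pattern : String) (out : Int) : Prop := out = get_pattern_priority_alt pattern
instance (pattern : String) (out : Int) : Decidable (Spec_get_pattern_priority pattern out) := by unfold Spec_get_pattern_priority; infer_instance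

-- ===== CLAIM =====
def Claim_equal_get_pattern_priority : Prop := ∀ (pattern : String), Dom_get_pattern_priority pattern → Spec_get_pattern_priority pattern (get_pattern_priority pattern)

-- ===== LEMMAS AND PROOFS =====

-- ===== VERDICT =====
set_option maxHeartbeats 2000000 in
theorem get_pattern_priority_spec : Claim_equal_get_pattern_priority := by
  intro pattern _
  unfold Spec_get_pattern_priority get_pattern_priority get_pattern_priority_alt pvRules
  simp only [PySem.Str.isIn_eq, PySem.Str.toList_upper, List.filter_cons, List.filter_nil,
    List.any_cons, List.any_nil, Bool.or_false]
  set u := PySem.Chars.upper pattern.toList with hu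
  by_cases h10 : (PySem.Chars.isIn "AMOUNT.*DUE".toList u || PySem.Chars.isIn "THIS.*AMOUNT.*DUE".toList u) = true <;>
  by_cases h9 : (PySem.Chars.isIn "TOTAL.*AMOUNT.*DUE".toList u || PySem.Chars.isIn "BALANCE.*DUE".toList u) = true <;>
  by_cases h8 : (PySem.Chars.isIn "ESTIMATE.*TOTAL".toList u || PySem.Chars.isIn "FINAL.*TOTAL".toList u) = true <;>
  by_cases h7 : PySem.Chars.isIn "TOTAL".toList u = true <;>
  by_cases h6 : (PySem.Chars.isIn "JAN".toList u || (PySem.Chars.isIn "FEB".toList u || (PySem.Chars.isIn "MAR".toList u || (PySem.Chars.isIn "APR".toList u || (PySem.Chars.isIn "MAY".toList u || PySem.Chars.isIn "JUN".toList u))))) = true <;>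
  by_cases h5 : PySem.Chars.isIn "\\d{2}/\\d{2}/\\d{4}".toList pattern.toList = true <;>
  simp only [h10, h9, h8, h7, h6, h5, if_true, List.map_cons, List.map_nil,
    List.cons_append, List.nil_append, PySem.List.max?, List.foldl_cons,
    List.foldl_nil] <;> norm_num
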